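-- pv_equiv track=rewrite | github.com/yasssine19/Automatic-epileptic-seizure-presence-and-onset-detection-in-EEG-signals | postprocessing.py | get_onset_of_longest_sequence
-- ===== SOURCE A (Python) =====
-- def get_onset_of_longest_sequence(cleaned):
--     """
--     Gibt den Startindex der längsten zusammenhängenden Einsen-Sequenz in einem binären Array zurück.
--
--     Parameter
--     ---------
--     cleaned : array_like
--         Binäres Array : eine bereinigte Vorhersagesequenz.
--
--     Rückgabewert
--     ------------
--     int oder None
--         Der Startindex der längsten Einsen-Sequenz. Falls keine Eins vorhanden ist, wird `None` zurückgegeben.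
--     """
--     max_len = 0
--     max_start = None
--     current_len = 0
--     current_start = None
--
--     for i, val in enumerate(cleaned):
--         if val == 1:
--             if current_len == 0:
--                 current_start = i
--             current_len += 1
--             if current_len > max_len:
--                 max_len = current_len
--                 max_start = current_start
--         else:
--             current_len = 0
--     return max_start
-- ===== SOURCE B (Python) =====
-- def get_onset_of_longest_sequence(cleaned):
--     # One pass building the list of (start, length) runs of ones, then pick
--     # the first run of maximal length.
--     runs = []
--     for i, val in enumerate(cleaned):
--         if val == 1:
--             if runs and runs[-1][0] + runs[-1][1] == i:
--                 runs[-1] = (runs[-1][0], runs[-1][1] + 1)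
--             else:
--                 runs.append((i, 1))
--     if not runs:
--         return None
--     best = runs[0]
--     for r in runs[1:]:
--         if r[1] > best[1]:
--             best = r
--     return best[0]
-- ===== Notes on version B (the rewrite author's own statement) =====
-- stated objective: alternative
-- what changed: B replaces A's four-scalar running-maximum fold with a two-phase decomposition: one pass builds the explicit list of (start, length) runs of ones, then a separate scan picks the first run of maximal length.
import Mathlib
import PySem

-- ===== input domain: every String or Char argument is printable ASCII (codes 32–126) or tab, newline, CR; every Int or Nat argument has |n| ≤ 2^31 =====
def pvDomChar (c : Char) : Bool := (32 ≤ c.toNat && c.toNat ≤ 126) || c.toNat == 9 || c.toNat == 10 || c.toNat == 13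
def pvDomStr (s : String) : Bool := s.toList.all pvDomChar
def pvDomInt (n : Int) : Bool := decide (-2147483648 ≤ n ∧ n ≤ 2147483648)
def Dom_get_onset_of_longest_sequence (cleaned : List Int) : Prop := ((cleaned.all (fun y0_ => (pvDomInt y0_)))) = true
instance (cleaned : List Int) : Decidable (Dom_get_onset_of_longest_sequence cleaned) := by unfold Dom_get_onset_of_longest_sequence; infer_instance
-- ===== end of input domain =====

-- B builds the list of (start, length) runs of ones in one pass and then takes the
-- first run of maximal length, instead of A's four-scalar running-maximum state;
-- same O(n) cost, different decomposition (objective: alternative).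

-- ===== PORT A =====
-- loop body of A: state is (max_len, max_start, current_len, current_start)
def pvStepA (st : Int × Option Int × Int × Option Int) (p : Int × Int) :
    Int × Option Int × Int × Option Int :=
  match st with
  | (maxLen, maxStart, curLen, curStart) =>
    if p.2 = 1 then
      let curStart' := if curLen = 0 then some p.1 else curStart
      let curLen' := curLen + 1
      if curLen' > maxLen then (curLen', curStart', curLen', curStart')
      else (maxLen, maxStart, curLen', curStart')
    else (maxLen, maxStart, 0, curStart)

def get_onset_of_longest_sequence (cleaned : List Int) : Option Int :=
  ((PySem.List.enumerate cleaned 0).foldl pvStepA (0, none, 0, none)).2.1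

-- ===== PORT B =====
-- loop body of B's first loop: extend the last run if adjacent, else start a new one
def pvStepB (runs : List (Int × Int)) (p : Int × Int) : List (Int × Int) :=
  if p.2 = 1 then
    match runs.getLast? with
    | some r => if r.1 + r.2 = p.1 then runs.dropLast ++ [(r.1, r.2 + 1)]
                else runs ++ [(p.1, 1)]
    | none => runs ++ [(p.1, 1)]
  else runs

-- loop body of B's second loop: first run of maximal length
def pvStepMax (b r : Int × Int) : Int × Int := if r.2 > b.2 then r else b

def get_onset_of_longest_sequence_alt (cleaned : List Int) : Option Int :=
  let runs := (PySem.List.enumerate cleaned 0).foldl pvStepB []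
  match runs with
  | [] => none
  | r :: rest => some ((rest.foldl pvStepMax r).1)

-- ===== PRECONDITION & SPEC =====
def Spec_get_onset_of_longest_sequence (cleaned : List Int) (out : Option Int) : Prop := out = get_onset_of_longest_sequence_alt cleaned
instance (cleaned : List Int) (out : Option Int) : Decidable (Spec_get_onset_of_longest_sequence cleaned out) := by unfold Spec_get_onset_of_longest_sequence; infer_instance

-- ===== CLAIM (what is proved, stated in full; the proofs are below) =====
def Claim_equal_get_onset_of_longest_sequence : Prop := ∀ (cleaned : List Int), Dom_get_onset_of_longest_sequence cleaned → Spec_get_onset_of_longest_sequence cleaned (get_onset_of_longest_sequence cleaned)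

-- ===== LEMMAS AND PROOFS =====

-- 'first run of maximal length' of the run list (none if empty)
def pvBest? (runs : List (Int × Int)) : Option (Int × Int) :=
  match runs with
  | [] => none
  | r :: rest => some (rest.foldl pvStepMax r)

def pvLenOf (o : Option (Int × Int)) : Int :=
  match o with
  | none => 0
  | some b => b.2

theorem pvBest?_concat (l : List (Int × Int)) (x : Int × Int) :
    pvBest? (l ++ [x]) = some (match pvBest? l with
      | none => x
      | some b => pvStepMax b x) := by
  cases l with
  | nil => simp [pvBest?]
  | cons r rest => simp [pvBest?, List.foldl_append]

-- the invariant tying A's scalar state to B's run list after processing indices < i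
def pvInv (i : Int) (st : Int × Option Int × Int × Option Int)
    (runs : List (Int × Int)) : Prop :=
  st.1 = pvLenOf (pvBest? runs) ∧
  st.2.1 = (pvBest? runs).map (·.1) ∧
  (∀ r ∈ runs, 0 < r.2 ∧ r.1 + r.2 ≤ i) ∧
  (match runs.getLast? with
   | none => st.2.2.1 = 0
   | some r => if r.1 + r.2 = i then st.2.2.1 = r.2 ∧ st.2.2.2 = some r.1
               else st.2.2.1 = 0)

theorem pvInv_step (i : Int) (v : Int) (st : Int × Option Int × Int × Option Int)
    (runs : List (Int × Int)) (h : pvInv i st runs) :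
    pvInv (i + 1) (pvStepA st (i, v)) (pvStepB runs (i, v)) := by
  obtain ⟨maxLen, maxStart, curLen, curStart⟩ := st
  obtain ⟨h1, h2, h3, h4⟩ := h
  simp only at h1 h2 h3 h4
  by_cases hv : v = 1
  · -- ones case
    cases hlast : runs.getLast? with
    | none =>
      -- runs is empty
      have hruns : runs = [] := List.getLast?_eq_none_iff.mp hlast
      subst hruns
      simp only [hlast, pvBest?] at h1 h2 h4
      refine ⟨?_, ?_, ?_, ?_⟩ <;>
        simp [pvStepA, pvStepB, hv, h4, pvBest?, pvLenOf, h1, h2]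
    | some r =>
      have hmem : r ∈ runs := List.mem_of_getLast? hlast
      have hrpos : 0 < r.2 := (h3 r hmem).1
      have hrle : r.1 + r.2 ≤ i := (h3 r hmem).2
      have hdecomp : runs.dropLast ++ [r] = runs := by
        have hne : runs ≠ [] := by
          intro hh; rw [hh] at hlast; simp at hlast
        have := List.getLast?_eq_some_getLast (l := runs) hne
        rw [hlast] at this
        have hr : runs.getLast hne = r := by
          injection this.symm
        rw [← hr]; exact List.dropLast_append_getLast hne
      simp only [hlast] at h4
      by_cases hadj : r.1 + r.2 = i
      · -- extend the last run
        rw [if_pos hadj] at h4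
        obtain ⟨hcl, hcs⟩ := h4
        subst hcl; subst hcs; subst hv
        have hbruns : pvBest? runs = some (match pvBest? runs.dropLast with
            | none => r | some b => pvStepMax b r) := by
          conv_lhs => rw [← hdecomp]
          exact pvBest?_concat _ _
        have hbnew : pvBest? (runs.dropLast ++ [(r.1, r.2 + 1)]) =
            some (match pvBest? runs.dropLast with
              | none => (r.1, r.2 + 1) | some b => pvStepMax b (r.1, r.2 + 1)) :=
          pvBest?_concat _ _
        rw [hbruns] at h1 h2
        have hB : pvStepB runs (i, 1) = runs.dropLast ++ [(r.1, r.2 + 1)] := by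
          simp [pvStepB, hlast, hadj]
        have hA : pvStepA (maxLen, maxStart, r.2, some r.1) (i, 1) =
            if r.2 + 1 > maxLen then (r.2 + 1, some r.1, r.2 + 1, some r.1)
            else (maxLen, maxStart, r.2 + 1, some r.1) := by
          simp [pvStepA, show ¬ r.2 = 0 by omega]
        rw [hB, hA]
        have hmem' : ∀ x ∈ runs.dropLast ++ [(r.1, r.2 + 1)], 0 < x.2 ∧ x.1 + x.2 ≤ i + 1 := by
          intro x hx
          rcases List.mem_append.mp hx with hx | hx
          · have := h3 x (List.dropLast_subset _ hx)
            exact ⟨this.1, by omega⟩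
          · simp at hx; subst hx; constructor <;> simp <;> omega
        have hlast' : (runs.dropLast ++ [(r.1, r.2 + 1)]).getLast? = some (r.1, r.2 + 1) := by
          simp
        have hlastgoal : (match (runs.dropLast ++ [(r.1, r.2 + 1)]).getLast? with
            | none => (r.2 + 1 : Int) = 0
            | some q => if q.1 + q.2 = i + 1 then (r.2 + 1 : Int) = q.2 ∧ (some r.1 : Option Int) = some q.1
                        else (r.2 + 1 : Int) = 0) := by
          rw [hlast']
          dsimp only
          rw [if_pos (by omega)]
          exact ⟨rfl, rfl⟩
        by_cases hgt : r.2 + 1 > maxLen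
        · rw [if_pos hgt]
          refine ⟨?_, ?_, hmem', hlastgoal⟩
          · rw [hbnew]
            cases hb0 : pvBest? runs.dropLast with
            | none => simp [pvLenOf]
            | some b =>
              rw [hb0] at h1
              simp only [pvLenOf, pvStepMax] at h1 ⊢
              split_ifs at h1 ⊢ <;> simp_all <;> omega
          · rw [hbnew]
            cases hb0 : pvBest? runs.dropLast with
            | none => simp
            | some b =>
              rw [hb0] at h1 h2
              simp only [pvLenOf, pvStepMax, Option.map] at h1 h2 ⊢
              split_ifs at h1 h2 ⊢ <;> simp_all <;> omega
        · rw [if_neg hgt]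
          refine ⟨?_, ?_, hmem', hlastgoal⟩
          · rw [hbnew]
            cases hb0 : pvBest? runs.dropLast with
            | none => rw [hb0] at h1; simp only [pvLenOf] at h1 ⊢; omega
            | some b =>
              rw [hb0] at h1
              simp only [pvLenOf, pvStepMax] at h1 ⊢
              split_ifs at h1 ⊢ <;> simp_all <;> omega
          · rw [hbnew]
            cases hb0 : pvBest? runs.dropLast with
            | none => rw [hb0] at h1 h2; simp only [pvLenOf, Option.map] at h1 h2 ⊢; omega
            | some b =>
              rw [hb0] at h1 h2
              simp only [pvLenOf, pvStepMax, Option.map] at h1 h2 ⊢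
              split_ifs at h1 h2 ⊢ <;> simp_all <;> omega
      · -- start a new run after a gap
        rw [if_neg hadj] at h4
        subst hv
        have hbnew : pvBest? (runs ++ [(i, 1)]) = some (match pvBest? runs with
            | none => ((i : Int), (1 : Int)) | some b => pvStepMax b (i, 1)) :=
          pvBest?_concat _ _
        have hA : pvStepA (maxLen, maxStart, curLen, curStart) (i, 1) =
            if 1 > maxLen then (1, some i, 1, some i)
            else (maxLen, maxStart, 1, some i) := by
          simp [pvStepA, h4]
        have hB : pvStepB runs (i, 1) = runs ++ [(i, 1)] := by
          simp [pvStepB, hlast, hadj]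
        rw [hA, hB]
        have hmem' : ∀ x ∈ runs ++ [(i, 1)], 0 < x.2 ∧ x.1 + x.2 ≤ i + 1 := by
          intro x hx
          rcases List.mem_append.mp hx with hx | hx
          · have := h3 x hx
            exact ⟨this.1, by omega⟩
          · simp at hx; subst hx; exact ⟨by norm_num, by simp⟩
        have hlast' : (runs ++ [(i, 1)]).getLast? = some (i, 1) := by simp
        have hlastgoal : (match (runs ++ [(i, 1)]).getLast? with
            | none => (1 : Int) = 0
            | some q => if q.1 + q.2 = i + 1 then (1 : Int) = q.2 ∧ (some i : Option Int) = some q.1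
                        else (1 : Int) = 0) := by
          rw [hlast']
          dsimp only
          rw [if_pos (by omega)]
          exact ⟨rfl, rfl⟩
        by_cases hgt : 1 > maxLen
        · rw [if_pos hgt]
          refine ⟨?_, ?_, hmem', hlastgoal⟩
          · rw [hbnew]
            cases hb0 : pvBest? runs with
            | none => simp [pvLenOf]
            | some b =>
              rw [hb0] at h1
              simp only [pvLenOf, pvStepMax] at h1 ⊢
              split_ifs at h1 ⊢ <;> simp_all <;> omega
          · rw [hbnew]
            cases hb0 : pvBest? runs with
            | none => simp
            | some b =>
              rw [hb0] at h1 h2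
              simp only [pvLenOf, pvStepMax, Option.map] at h1 h2 ⊢
              split_ifs at h1 h2 ⊢ <;> simp_all <;> omega
        · rw [if_neg hgt]
          refine ⟨?_, ?_, hmem', hlastgoal⟩
          · rw [hbnew]
            cases hb0 : pvBest? runs with
            | none => rw [hb0] at h1; simp only [pvLenOf] at h1 ⊢; omega
            | some b =>
              rw [hb0] at h1
              simp only [pvLenOf, pvStepMax] at h1 ⊢
              split_ifs at h1 ⊢ <;> simp_all <;> omega
          · rw [hbnew]
            cases hb0 : pvBest? runs with
            | none => rw [hb0] at h1 h2; simp only [pvLenOf, Option.map] at h1 h2 ⊢; omega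
            | some b =>
              rw [hb0] at h1 h2
              simp only [pvLenOf, pvStepMax, Option.map] at h1 h2 ⊢
              split_ifs at h1 h2 ⊢ <;> simp_all <;> omega
  · -- not a one: state resets, runs unchanged
    refine ⟨?_, ?_, ?_, ?_⟩
    · simpa [pvStepA, pvStepB, hv] using h1
    · simpa [pvStepA, pvStepB, hv] using h2
    · intro r hr
      have := h3 r (by simpa [pvStepB, hv] using hr)
      exact ⟨this.1, by omega⟩
    · have hB : pvStepB runs (i, v) = runs := by simp [pvStepB, hv]
      have hA : pvStepA (maxLen, maxStart, curLen, curStart) (i, v) =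
          (maxLen, maxStart, 0, curStart) := by simp [pvStepA, hv]
      rw [hB, hA]
      cases hlast : runs.getLast? with
      | none => dsimp only
      | some r =>
        have hle := (h3 r (List.mem_of_getLast? hlast)).2
        dsimp only
        rw [if_neg (by omega)]

theorem pvInv_fold (l : List Int) : ∀ (i : Int) (st : Int × Option Int × Int × Option Int)
    (runs : List (Int × Int)), pvInv i st runs →
    pvInv (i + l.length) ((PySem.List.enumerate l i).foldl pvStepA st)
      ((PySem.List.enumerate l i).foldl pvStepB runs) := by
  induction l with
  | nil => intro i st runs h; simpa [PySem.List.enumerate_nil] using h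
  | cons x xs ih =>
    intro i st runs h
    have := ih (i + 1) (pvStepA st (i, x)) (pvStepB runs (i, x)) (pvInv_step i x st runs h)
    simp only [PySem.List.enumerate_cons, List.foldl_cons]
    have harith : i + 1 + (xs.length : Int) = i + ((x :: xs).length : Int) := by
      simp; omega
    rwa [harith] at this

-- ===== VERDICT (by name: the statement is the Claim_ definition above) =====
theorem get_onset_of_longest_sequence_spec : Claim_equal_get_onset_of_longest_sequence := by
  intro cleaned _
  have h0 : pvInv 0 ((0 : Int), (none : Option Int), (0 : Int), (none : Option Int)) [] := by
    refine ⟨rfl, rfl, by simp, by simp⟩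
  have h := pvInv_fold cleaned 0 _ _ h0
  obtain ⟨h1, h2, h3, h4⟩ := h
  show get_onset_of_longest_sequence cleaned = get_onset_of_longest_sequence_alt cleaned
  unfold get_onset_of_longest_sequence get_onset_of_longest_sequence_alt
  rw [h2]
  cases hr : (PySem.List.enumerate cleaned 0).foldl pvStepB [] with
  | nil => simp [pvBest?]
  | cons r rest => simp [pvBest?]
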